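-- pv_equiv track=rewrite | github.com/JLDJR2481/Codewars | KYU6/Who likes it.py | likes
-- ===== SOURCE A (Python) =====
-- def likes(names):
--
--     l_likes = []
--     list_for_3 = []
--
--     if names == []:
--         return 'no one likes this'
--     else:
--         for i in names:
--             if len(names) == 1:
--                 l_likes.append(i)
--                 return ''.join(l_likes) + " likes this"
--
--             if len(names) == 2:
--                 l_likes.append(i)
--                 if len(l_likes) != 2:
--                     continue
--                 if len(l_likes) == 2:
--                     return ' and '.join(l_likes) + " like this"
--
--             if len(names) == 3:
--                 if len(l_likes) != 2:
--                     l_likes.append(i)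
--                     continue
--                 if len(l_likes) == 2:
--                     list_for_3.append(i)
--                     return ', '.join(l_likes) + " and " + ''.join(list_for_3) + " like this"
--
--             if len(names) >= 4:
--                 if len(l_likes) != 2:
--                     l_likes.append(i)
--                     continue
--                 if len(l_likes) == 2:
--                     others = len(names) - len(l_likes)
--             return ', '.join(l_likes) + " and " + str(others) + " others like this"
-- ===== SOURCE B (Python) =====
-- def likes(names):
--     n = len(names)
--     if n == 0:
--         return 'no one likes this'
--     if n == 1:
--         return f'{names[0]} likes this'
--     if n == 2:
--         return f'{names[0]} and {names[1]} like this'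
--     if n == 3:
--         return f'{names[0]}, {names[1]} and {names[2]} like this'
--     return f'{names[0]}, {names[1]} and {n - 2} others like this'
-- ===== Notes on version B (the rewrite author's own statement) =====
-- stated objective: simpler
-- what changed: Replaced the loop that accumulates names into l_likes/list_for_3 with a direct branch on len(names) returning each of the five fixed formats by indexing; no iteration or maintained state.
import Mathlib
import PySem

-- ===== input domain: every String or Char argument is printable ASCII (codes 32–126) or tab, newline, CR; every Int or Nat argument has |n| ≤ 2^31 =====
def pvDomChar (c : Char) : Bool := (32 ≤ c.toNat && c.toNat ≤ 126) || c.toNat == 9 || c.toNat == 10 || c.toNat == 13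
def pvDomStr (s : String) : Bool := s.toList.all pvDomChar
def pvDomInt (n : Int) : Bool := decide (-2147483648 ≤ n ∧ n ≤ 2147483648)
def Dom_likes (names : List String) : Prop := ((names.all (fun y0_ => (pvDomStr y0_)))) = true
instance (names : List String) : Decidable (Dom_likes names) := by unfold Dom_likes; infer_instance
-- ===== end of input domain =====

-- B replaces A's accumulator loop by a direct five-way branch on the length of `names`; objective: simpler.

-- ===== PORT A =====
-- the `for i in names` loop: `rest` is the remaining iterates, `names` the whole list,
-- `l` is l_likes, `l3` is list_for_3. The `[]` case is unreachable in Python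
-- (every non-empty `names` returns within the first three iterations); "" stands in for it.
def likesLoop (names : List String) (l l3 : List String) : List String → String
  | [] => ""
  | i :: rest =>
    if names.length == 1 then
      PySem.Str.join "" (l ++ [i]) ++ " likes this"
    else if names.length == 2 then
      let l := l ++ [i]
      if l.length ≠ 2 then likesLoop names l l3 rest
      else PySem.Str.join " and " l ++ " like this"
    else if names.length == 3 then
      if l.length ≠ 2 then likesLoop names (l ++ [i]) l3 rest
      else PySem.Str.join ", " l ++ " and " ++ PySem.Str.join "" (l3 ++ [i]) ++ " like this"
    else if 4 ≤ names.length then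
      if l.length ≠ 2 then likesLoop names (l ++ [i]) l3 rest
      else
        let others : Int := (names.length : Int) - (l.length : Int)
        PySem.Str.join ", " l ++ " and " ++ PySem.Int.toStr others ++ " others like this"
    else "" -- unreachable: names ≠ [] inside the loop, so its length is 1, 2, 3 or ≥ 4

def likes (names : List String) : String :=
  if names == [] then "no one likes this"
  else likesLoop names [] [] names

-- ===== PORT B =====
def likes_alt (names : List String) : String :=
  match names with
  | [] => "no one likes this"
  | [a] => a ++ " likes this"
  | [a, b] => a ++ " and " ++ b ++ " like this"
  | [a, b, c] => a ++ ", " ++ b ++ " and " ++ c ++ " like this"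
  | a :: b :: rest =>
      a ++ ", " ++ b ++ " and " ++ PySem.Int.toStr ((rest.length : Int)) ++ " others like this"

-- ===== PRECONDITION & SPEC =====
def Spec_likes (names : List String) (out : String) : Prop := out = likes_alt names
instance (names : List String) (out : String) : Decidable (Spec_likes names out) := by unfold Spec_likes; infer_instance

-- ===== CLAIM (what is proved, stated in full; the proofs are below) =====
def Claim_equal_likes : Prop := ∀ (names : List String), Dom_likes names → Spec_likes names (likes names)

-- ===== LEMMAS AND PROOFS =====

theorem join_empty_singleton (a : String) : PySem.Str.join "" [a] = a := by
  simp [PySem.Str.join, PySem.Chars.join, List.intercalate]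

theorem join_pair (sep a b : String) :
    PySem.Str.join sep [a, b] = a ++ sep ++ b := by
  simp [PySem.Str.join, PySem.Chars.join]
  apply String.toList_injective
  simp [String.toList_append, List.intercalate, List.intersperse]

-- ===== VERDICT (by name: the statement is the Claim_ definition above) =====
theorem likes_spec : Claim_equal_likes := by
  intro names _
  unfold Spec_likes
  match names with
  | [] => rfl
  | [a] => simp [likes, likes_alt, likesLoop, join_empty_singleton]
  | [a, b] => simp [likes, likes_alt, likesLoop, join_pair]
  | [a, b, c] =>
      simp [likes, likes_alt, likesLoop, join_pair, join_empty_singleton]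
  | a :: b :: c :: d :: rest =>
      simp [likes, likes_alt, likesLoop, join_pair]
      congr 3
      ring
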